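-- pv_equiv track=rewrite | github.com/world-dv/Python_Programmers | Lv3/Summer_Winter Coding(~2018)/Number game.py | solution
-- ===== SOURCE A (Python) =====
-- def solution(A, B):
--     answer = 0
--     A = sorted(A)
--     B = sorted(B)
--     for i in A:
--         for jdx in range(len(B)):
--             if B[jdx] > i:
--                 B.pop(jdx)
--                 answer += 1
--                 break
--     return answer
-- ===== SOURCE B (Python) =====
-- def solution(A, B):
--     A = sorted(A)
--     B = sorted(B)
--     cnt = 0
--     j = 0
--     for a in A:
--         while j < len(B) and B[j] <= a:
--             j += 1
--         if j == len(B):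
--             break
--         cnt += 1
--         j += 1
--     return cnt
-- ===== Notes on version B (the rewrite author's own statement) =====
-- stated objective: faster
-- what changed: Replaces the per-element front-to-back rescan with pop() by a single two-pointer sweep over the two sorted lists, so each B element is inspected once.
import Mathlib
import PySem

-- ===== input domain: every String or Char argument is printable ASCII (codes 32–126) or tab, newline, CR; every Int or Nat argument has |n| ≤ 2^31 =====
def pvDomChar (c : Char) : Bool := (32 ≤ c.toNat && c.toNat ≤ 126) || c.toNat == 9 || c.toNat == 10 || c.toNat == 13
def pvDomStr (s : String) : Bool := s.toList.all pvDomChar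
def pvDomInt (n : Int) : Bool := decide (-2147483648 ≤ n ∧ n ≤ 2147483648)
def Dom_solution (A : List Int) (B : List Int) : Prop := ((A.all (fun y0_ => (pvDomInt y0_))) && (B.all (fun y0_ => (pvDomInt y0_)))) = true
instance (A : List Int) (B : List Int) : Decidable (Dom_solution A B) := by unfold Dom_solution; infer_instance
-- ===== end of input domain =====

-- B replaces A's quadratic rescan-and-pop with a sorted two-pointer sweep (asymptotically faster).


-- ===== PORT A =====
-- inner 'for jdx in range(len(B)): if B[jdx] > i: B.pop(jdx); break':
-- scan B in order; on the first element > i, remove it (some new B); none = no break happened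
def popFirstGT (i : Int) : List Int → Option (List Int)
  | [] => none
  | b :: bs => if b > i then some bs else (popFirstGT i bs).map (b :: ·)

-- outer 'for i in A' with mutable B and answer
def solLoop : List Int → List Int → Int → Int
  | [], _, ans => ans
  | a :: as, B, ans =>
    match popFirstGT a B with
    | some B' => solLoop as B' (ans + 1)
    | none => solLoop as B ans

def solution (A : List Int) (B : List Int) : Int :=
  solLoop (PySem.List.sorted A (fun x => x) false) (PySem.List.sorted B (fun x => x) false) 0

-- ===== PORT B =====
-- two-pointer sweep over the sorted lists: advance j past B-elements ≤ a, match or stop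
def twoPtr : List Int → List Int → Int
  | [], _ => 0
  | _ :: _, [] => 0
  | a :: as, b :: bs => if b > a then 1 + twoPtr as bs else twoPtr (a :: as) bs
termination_by xs ys => (xs.length, ys.length)

def solution_alt (A : List Int) (B : List Int) : Int :=
  twoPtr (PySem.List.sorted A (fun x => x) false) (PySem.List.sorted B (fun x => x) false)

-- ===== PRECONDITION & SPEC =====
def Spec_solution (A : List Int) (B : List Int) (out : Int) : Prop := out = solution_alt A B
instance (A : List Int) (B : List Int) (out : Int) : Decidable (Spec_solution A B out) := by unfold Spec_solution; infer_instance

-- ===== CLAIM (what is proved, stated in full; the proofs are below) =====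
def Claim_equal_solution : Prop := ∀ (A : List Int) (B : List Int), Dom_solution A B → Spec_solution A B (solution A B)

-- ===== LEMMAS AND PROOFS =====

theorem popFirstGT_none_iff (a : Int) (B : List Int) :
    popFirstGT a B = none ↔ ∀ b ∈ B, b ≤ a := by
  induction B with
  | nil => simp [popFirstGT]
  | cons b bs ih =>
    by_cases h : b > a
    · constructor
      · intro hnone; simp [popFirstGT, h] at hnone
      · intro hall; exact absurd (hall b (by simp)) (by omega)
    · have hb : b ≤ a := by omega
      simp [popFirstGT, h, Option.map_eq_none_iff, ih, hb]

theorem popFirstGT_some (a : Int) (B B0 : List Int) (h : popFirstGT a B = some B0) :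
    ∃ P b R, B = P ++ b :: R ∧ B0 = P ++ R ∧ (∀ p ∈ P, p ≤ a) ∧ b > a := by
  induction B generalizing B0 with
  | nil => simp [popFirstGT] at h
  | cons c cs ih =>
    by_cases hc : c > a
    · simp [popFirstGT, hc] at h
      exact ⟨[], c, cs, by simp, by simp [h], by simp, hc⟩
    · simp [popFirstGT, hc] at h
      obtain ⟨B1, hB1, heq⟩ := h
      obtain ⟨P, b, R, h1, h2, h3, h4⟩ := ih B1 hB1
      refine ⟨c :: P, b, R, by simp [h1], by simp [← heq, h2], ?_, h4⟩
      intro p hp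
      rcases List.mem_cons.mp hp with rfl | hp
      · omega
      · exact h3 p hp

-- elements all ≤ every later A-element are never popped, so a low prefix of B can be discarded
theorem solLoop_discard (as P X : List Int) (ans : Int)
    (h : ∀ p ∈ P, ∀ a ∈ as, p ≤ a) :
    solLoop as (P ++ X) ans = solLoop as X ans := by
  induction as generalizing P X ans with
  | nil => simp [solLoop]
  | cons a as ih =>
    have hPle : ∀ p ∈ P, p ≤ a := fun p hp => h p hp a (by simp)
    have hmap : popFirstGT a (P ++ X) = (popFirstGT a X).map (P ++ ·) := by
      clear h ih
      induction P with
      | nil => simp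
      | cons p ps ihp =>
        have : ¬ p > a := by have := hPle p (by simp); omega
        simp only [List.cons_append, popFirstGT, this]
        rw [ihp (fun q hq => hPle q (by simp [hq]))]
        cases popFirstGT a X <;> simp
    have htail : ∀ p ∈ P, ∀ a' ∈ as, p ≤ a' := fun p hp a' ha' => h p hp a' (by simp [ha'])
    simp only [solLoop, hmap]
    cases hX : popFirstGT a X with
    | none => simp; exact ih P X ans htail
    | some X' => simp; exact ih P X' (ans + 1) htail

theorem twoPtr_skip (a : Int) (as P X : List Int) (hP : ∀ p ∈ P, p ≤ a) :
    twoPtr (a :: as) (P ++ X) = twoPtr (a :: as) X := by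
  induction P with
  | nil => rfl
  | cons p ps ih =>
    have : ¬ p > a := by have := hP p (by simp); omega
    simp only [List.cons_append, twoPtr, if_neg this]
    exact ih (fun q hq => hP q (by simp [hq]))

theorem twoPtr_nil_right (xs : List Int) : twoPtr xs [] = 0 := by
  cases xs <;> simp [twoPtr]

theorem solLoop_nil_right (as : List Int) (ans : Int) : solLoop as [] ans = ans := by
  induction as with
  | nil => rfl
  | cons a as ih => simp [solLoop, popFirstGT, ih]

theorem solLoop_eq_twoPtr (as B : List Int) (ans : Int)
    (hA : as.Pairwise (· ≤ ·)) (hB : B.Pairwise (· ≤ ·)) :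
    solLoop as B ans = ans + twoPtr as B := by
  induction as generalizing B ans with
  | nil => simp [solLoop, twoPtr]
  | cons a as ih =>
    have hA' : as.Pairwise (· ≤ ·) := hA.of_cons
    have hale : ∀ a' ∈ as, a ≤ a' := fun a' ha' => List.rel_of_pairwise_cons hA ha'
    cases hpop : popFirstGT a B with
    | none =>
      have hall : ∀ b ∈ B, b ≤ a := (popFirstGT_none_iff a B).mp hpop
      have h0 : twoPtr (a :: as) B = 0 := by
        have := twoPtr_skip a as B [] hall
        simpa [twoPtr_nil_right] using this
      have hd : solLoop as (B ++ []) ans = solLoop as [] ans :=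
        solLoop_discard as B [] ans (fun p hp a' ha' => le_trans (hall p hp) (hale a' ha'))
      simp only [solLoop, hpop, h0]
      have := (List.append_nil B ▸ hd).trans (solLoop_nil_right as ans)
      simpa using this
    | some B0 =>
      obtain ⟨P, b, R, hBeq, hB0, hPle, hba⟩ := popFirstGT_some a B B0 hpop
      have hR : R.Pairwise (· ≤ ·) := by
        have : (b :: R).Pairwise (· ≤ ·) :=
          (List.pairwise_append.mp (hBeq ▸ hB)).2.1
        exact this.of_cons
      have hleft : solLoop (a :: as) B ans = ans + 1 + twoPtr as R := by
        simp only [solLoop, hpop, hB0]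
        rw [solLoop_discard as P R (ans + 1)
              (fun p hp a' ha' => le_trans (hPle p hp) (hale a' ha'))]
        exact ih R (ans + 1) hA' hR
      have hright : twoPtr (a :: as) B = 1 + twoPtr as R := by
        rw [hBeq, twoPtr_skip a as P (b :: R) hPle]
        simp [twoPtr, hba]
      rw [hleft, hright]; ring

-- ===== VERDICT (by name: the statement is the Claim_ definition above) =====
theorem solution_spec : Claim_equal_solution := by
  intro A B _
  unfold Spec_solution solution solution_alt
  have hA := PySem.List.sorted_pairwise A (fun x => x)
  have hB := PySem.List.sorted_pairwise B (fun x => x)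
  simpa using solLoop_eq_twoPtr _ _ 0 hA hB
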